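-- pv_equiv track=rewrite | github.com/Habosjob/Vibe | moex_bond_screener/emitents.py | _collect_market_instruments
-- ===== SOURCE A (Python) =====
-- from typing import Any, Callable
--
-- def _collect_market_instruments(rows: list[dict[str, Any]], instrument_key: str) -> dict[str, list[str]]:
--     instruments: dict[str, set[str]] = {}
--     for row in rows:
--         emitter_id = _normalize_emitter_id(
--             row.get("EMITTER_ID")
--             or row.get("ISSUER_ID")
--             or row.get("EMITTERID")
--             or row.get("ISSUERID")
--             or ""
--         )
--         instrument = str(row.get(instrument_key) or "").strip()
--         if not emitter_id or not instrument:
--             continue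
--         instruments.setdefault(emitter_id, set()).add(instrument)
--
--     return {key: sorted(values) for key, values in instruments.items()}
--
-- def _normalize_emitter_id(raw_value: Any) -> str:
--     value = str(raw_value or "").strip()
--     if not value:
--         return ""
--     if value.endswith(".0"):
--         integer_part = value[:-2]
--         if integer_part.isdigit():
--             return integer_part
--     return value
-- ===== SOURCE B (Python) =====
-- def _normalize_emitter_id(raw_value) -> str:
--     value = str(raw_value or "").strip()
--     if not value:
--         return ""
--     if value.endswith(".0"):
--         integer_part = value[:-2]
--         if integer_part.isdigit():
--             return integer_part
--     return value
--
-- def _collect_market_instruments(rows, instrument_key):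
--     # One pass collects valid (emitter, instrument) pairs and fixes the key order;
--     # one global stable sort by instrument + consecutive dedup replaces per-key set + sort.
--     pairs = []
--     result = {}
--     for row in rows:
--         emitter_id = _normalize_emitter_id(
--             row.get("EMITTER_ID")
--             or row.get("ISSUER_ID")
--             or row.get("EMITTERID")
--             or row.get("ISSUERID")
--             or ""
--         )
--         instrument = str(row.get(instrument_key) or "").strip()
--         if emitter_id and instrument:
--             result.setdefault(emitter_id, [])
--             pairs.append((emitter_id, instrument))
--     pairs.sort(key=lambda p: p[1])
--     for eid, inst in pairs:
--         bucket = result[eid]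
--         if not bucket or bucket[-1] != inst:
--             bucket.append(inst)
--     return result
-- ===== Notes on version B (the rewrite author's own statement) =====
-- stated objective: alternative
-- what changed: Replaces the dict-of-sets pass with per-key sorted(set) by collecting the valid (emitter, instrument) pairs, one global stable sort by instrument, and a single grouped pass that appends with consecutive dedup into lists whose key order was fixed up front.
import Mathlib
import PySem

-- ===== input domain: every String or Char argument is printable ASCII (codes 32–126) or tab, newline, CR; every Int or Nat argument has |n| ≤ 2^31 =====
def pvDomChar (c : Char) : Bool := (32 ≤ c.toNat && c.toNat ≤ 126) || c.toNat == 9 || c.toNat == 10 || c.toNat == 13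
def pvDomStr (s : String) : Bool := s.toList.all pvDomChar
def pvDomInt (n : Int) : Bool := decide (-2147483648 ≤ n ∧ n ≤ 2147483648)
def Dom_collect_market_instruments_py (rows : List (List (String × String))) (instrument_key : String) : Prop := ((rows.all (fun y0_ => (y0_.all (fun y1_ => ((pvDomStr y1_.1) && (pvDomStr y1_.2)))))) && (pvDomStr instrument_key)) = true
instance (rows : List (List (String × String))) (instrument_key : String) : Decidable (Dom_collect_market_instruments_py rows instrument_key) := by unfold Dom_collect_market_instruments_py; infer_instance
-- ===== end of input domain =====

-- B groups by a single global stable sort of the valid (emitter, instrument) pairs by instrument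
-- followed by one grouped pass with consecutive dedup, instead of A's dict of sets with a per-key sort
-- (objective: alternative algorithm of the same cost).

-- ===== PORT A =====
-- `x or y` on strings/None (both Pythons contain the identical row-field expressions; helpers shared by both ports)
def pvOrStr (x : Option String) (y : String) : String :=
  match x with
  | none => y
  | some s => if s = "" then y else s

-- row.get("EMITTER_ID") or row.get("ISSUER_ID") or row.get("EMITTERID") or row.get("ISSUERID") or ""
def pvRowEmitterRaw (row : List (String × String)) : String :=
  pvOrStr ((PySem.Dict.mk row).get? "EMITTER_ID")
    (pvOrStr ((PySem.Dict.mk row).get? "ISSUER_ID")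
      (pvOrStr ((PySem.Dict.mk row).get? "EMITTERID")
        (pvOrStr ((PySem.Dict.mk row).get? "ISSUERID") "")))

-- _normalize_emitter_id (identical helper in both Pythons); argument is already a string here
def normalize_emitter_id_py (raw : String) : String :=
  let value := PySem.Str.strip raw
  if value = "" then ""
  else if PySem.Str.endswith value ".0" then
    let integer_part := PySem.Str.slice value none (some (-2))
    if PySem.Str.strIsdigit integer_part then integer_part else value
  else value

-- str(row.get(instrument_key) or "").strip()
def pvRowInstrument (row : List (String × String)) (instrument_key : String) : String :=
  PySem.Str.strip (pvOrStr ((PySem.Dict.mk row).get? instrument_key) "")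

def collect_market_instruments_py (rows : List (List (String × String))) (instrument_key : String) : List (String × List String) :=
  let instruments : PySem.Dict String (PySem.Set String) :=
    rows.foldl (fun d row =>
      let emitter_id := normalize_emitter_id_py (pvRowEmitterRaw row)
      let instrument := pvRowInstrument row instrument_key
      if emitter_id = "" ∨ instrument = "" then d
      else d.modify emitter_id PySem.Set.empty (fun s => PySem.Set.add s instrument))
      PySem.Dict.empty
  instruments.items.map (fun p => (p.1, PySem.List.sorted p.2 (fun x => x) false))

-- ===== PORT B =====
def collect_market_instruments_py_alt (rows : List (List (String × String))) (instrument_key : String) : List (String × List String) :=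
  let st :=
    rows.foldl (fun (st : List (String × String) × PySem.Dict String (List String)) row =>
      let emitter_id := normalize_emitter_id_py (pvRowEmitterRaw row)
      let instrument := pvRowInstrument row instrument_key
      if emitter_id ≠ "" ∧ instrument ≠ "" then
        (st.1 ++ [(emitter_id, instrument)], st.2.setdefault emitter_id [])
      else st)
      ([], PySem.Dict.empty)
  let pairs := PySem.List.sorted st.1 (fun p => p.2) false
  let result := pairs.foldl (fun d p =>
      let bucket := d.getD p.1 []
      if bucket = [] ∨ PySem.List.pyGet? bucket (-1) ≠ some p.2 then
        d.modify p.1 [] (fun b => b ++ [p.2])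
      else d) st.2
  result.items

-- ===== PRECONDITION & SPEC =====
def Spec_collect_market_instruments_py (rows : List (List (String × String))) (instrument_key : String) (out : List (String × List String)) : Prop := out = collect_market_instruments_py_alt rows instrument_key
instance (rows : List (List (String × String))) (instrument_key : String) (out : List (String × List String)) : Decidable (Spec_collect_market_instruments_py rows instrument_key out) := by unfold Spec_collect_market_instruments_py; infer_instance

-- ===== CLAIM (what is proved, stated in full; the proofs are below) =====
def Claim_equal_collect_market_instruments_py : Prop := ∀ (rows : List (List (String × String))) (instrument_key : String), Dom_collect_market_instruments_py rows instrument_key → Spec_collect_market_instruments_py rows instrument_key (collect_market_instruments_py rows instrument_key)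

-- ===== LEMMAS AND PROOFS =====

def pvPairOf (instrument_key : String) (row : List (String × String)) : Option (String × String) :=
  let e := normalize_emitter_id_py (pvRowEmitterRaw row)
  let i := pvRowInstrument row instrument_key
  if e = "" ∨ i = "" then none else some (e, i)

def pvInstrs (L : List (String × String)) (k : String) : List String :=
  (L.filter (fun p => p.1 == k)).map (·.2)
def pvBStep (b : List String) (y : String) : List String :=
  if b = [] ∨ PySem.List.pyGet? b (-1) ≠ some y then b ++ [y] else b

lemma pvPyGet_neg_one (l : List String) : PySem.List.pyGet? l (-1) = l.getLast? := by
  simp [PySem.List.pyGet?, PySem.List.pyIdx?]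
  rcases l with _ | ⟨a, t⟩ <;> simp [List.getLast?_eq_getElem?]

lemma pvA_keys (L : List (String × String)) :
    (L.foldl (fun d p => d.modify p.1 [] (fun s => PySem.Set.add s p.2)) PySem.Dict.empty).keys
      = PySem.Set.ofList (L.map (·.1)) := by
  rw [PySem.Dict.keys_foldl_modify_key (key := fun p : String × String => p.1)
    (d0 := []) (f := fun _ p => fun s => PySem.Set.add s p.2)]
  simp [PySem.Set.update, PySem.Set.ofList_eq_foldl]

lemma pvA_keys_nodup (L : List (String × String)) :
    (L.foldl (fun d p => d.modify p.1 [] (fun s => PySem.Set.add s p.2)) PySem.Dict.empty).keys.Nodup := by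
  rw [pvA_keys]; exact PySem.Set.nodup_ofList _

lemma pvB_keys (L : List (String × String)) (d : PySem.Dict String (List String)) :
    (L.foldl (fun d p => d.setdefault p.1 []) d).keys = PySem.Set.update d.keys (L.map (·.1)) := by
  induction L generalizing d with
  | nil => simp [PySem.Set.update]
  | cons p L ih =>
    simp only [List.foldl_cons, List.map_cons, ih, PySem.Set.update]
    congr 1
    rw [PySem.Dict.keys_setdefault]
    simp only [PySem.Set.add, PySem.Set.contains]
    by_cases h : d.contains p.1 = true
    · rw [if_pos h, if_pos]
      rw [List.contains_iff_mem]  -- d.keys.contains p.1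
      exact (PySem.Dict.contains_iff_mem_keys d p.1).mp h
    · rw [if_neg h, if_neg]
      intro hc
      exact h ((PySem.Dict.contains_iff_mem_keys d p.1).mpr (List.contains_iff_mem.mp hc))

lemma pvB_getD1 (L : List (String × String)) (d : PySem.Dict String (List String))
    (h : ∀ j, d.getD j [] = []) (k : String) :
    (L.foldl (fun d p => d.setdefault p.1 []) d).getD k [] = [] := by
  induction L generalizing d with
  | nil => exact h k
  | cons p L ih =>
    simp only [List.foldl_cons]
    apply ih
    intro j
    by_cases hc : d.contains p.1 = true
    · rw [PySem.Dict.setdefault_of_contains _ _ hc]; exact h j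
    · rw [PySem.Dict.setdefault_of_not_contains _ _ (by simpa using hc), PySem.Dict.getD_insert]
      split_ifs with hj
      · rfl
      · exact h j

lemma pvB_getD2 (M : List (String × String)) (d : PySem.Dict String (List String)) (k : String) :
    ((M.foldl (fun d p =>
        if d.getD p.1 [] = [] ∨ PySem.List.pyGet? (d.getD p.1 []) (-1) ≠ some p.2 then
          d.modify p.1 [] (fun b => b ++ [p.2])
        else d) d).getD k [])
      = (pvInstrs M k).foldl pvBStep (d.getD k []) := by
  induction M generalizing d with
  | nil => simp [pvInstrs]
  | cons p M ih =>
    simp only [List.foldl_cons, pvInstrs, List.filter_cons]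
    by_cases hk : p.1 = k
    · simp only [hk, beq_self_eq_true, if_pos, List.map_cons, List.foldl_cons]
      rw [ih]
      congr 1
      simp only [pvBStep]
      split_ifs with h
      · rw [PySem.Dict.getD_modify]; simp
      · rfl
    · have hbeq : (p.1 == k) = false := by simp [hk]
      simp only [hbeq, if_neg, Bool.false_eq_true, not_false_eq_true]
      rw [ih]
      congr 1
      split_ifs with h
      · rw [PySem.Dict.getD_modify, if_neg (Ne.symm hk)]
      · rfl

lemma pvB_keys2 (M : List (String × String)) (d : PySem.Dict String (List String))
    (h : ∀ p ∈ M, p.1 ∈ d.keys) :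
    (M.foldl (fun d p =>
        if d.getD p.1 [] = [] ∨ PySem.List.pyGet? (d.getD p.1 []) (-1) ≠ some p.2 then
          d.modify p.1 [] (fun b => b ++ [p.2])
        else d) d).keys = d.keys := by
  induction M generalizing d with
  | nil => rfl
  | cons p M ih =>
    simp only [List.foldl_cons]
    have hk : (if d.getD p.1 [] = [] ∨ PySem.List.pyGet? (d.getD p.1 []) (-1) ≠ some p.2 then
          d.modify p.1 [] (fun b => b ++ [p.2]) else d).keys = d.keys := by
      split_ifs with hc
      · rw [PySem.Dict.keys_modify, PySem.Dict.keys_insert_of_contains]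
        exact (PySem.Dict.contains_iff_mem_keys d p.1).mpr (h p (by simp))
      · rfl
    rw [ih, hk]
    intro q hq
    rw [hk]
    exact h q (by simp [hq])

lemma pvFoldAdd_sublist (xs s : List String) : (xs.foldl PySem.Set.add s).Sublist (s ++ xs) := by
  induction xs generalizing s with
  | nil => simp
  | cons x xs ih =>
    simp only [List.foldl_cons, PySem.Set.add]
    split_ifs with h
    · exact (ih s).trans (List.Sublist.append_left (List.sublist_cons_self x xs) s)
    · simpa using ih (s ++ [x])

lemma pvOfList_sublist (xs : List String) : (PySem.Set.ofList xs).Sublist xs := by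
  rw [PySem.Set.ofList_eq_foldl]
  simpa using pvFoldAdd_sublist xs []

lemma pvLe_getLast (b : List String) (hne : b ≠ []) (hb : b.Pairwise (· ≤ ·))
    (y : String) (hm : y ∈ b) : y ≤ b.getLast hne := by
  have hsplit := List.dropLast_append_getLast hne
  have hb' : (b.dropLast ++ [b.getLast hne]).Pairwise (· ≤ ·) := by rw [hsplit]; exact hb
  have hp := List.pairwise_append.mp hb'
  rw [← hsplit] at hm
  rcases List.mem_append.mp hm with h | h
  · exact hp.2.2 y h _ (by simp)
  · simp at h; rw [h]

lemma pvBStep_eq_add (b : List String) (y : String)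
    (hb : b.Pairwise (· ≤ ·)) (hy : ∀ x ∈ b, x ≤ y) :
    pvBStep b y = PySem.Set.add b y := by
  rcases eq_or_ne b [] with rfl | hne
  · simp [pvBStep, PySem.Set.add, PySem.Set.contains]
  · have hmem_iff : y ∈ b ↔ b.getLast hne = y := by
      constructor
      · intro hm
        exact le_antisymm (hy _ (List.getLast_mem hne)) (pvLe_getLast b hne hb y hm)
      · intro hl; rw [← hl]; exact List.getLast_mem hne
    simp only [pvBStep, PySem.Set.add, PySem.Set.contains, pvPyGet_neg_one,
      List.getLast?_eq_some_getLast hne, hne, false_or]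
    by_cases hm : y ∈ b
    · rw [if_neg (by simp [hmem_iff.mp hm]), if_pos (by simpa using hm)]
    · rw [if_pos (by simp; intro hcon; exact hm (hmem_iff.mpr hcon)),
        if_neg (by simpa using hm)]

lemma pvBStep_sorted (ys : List String) : ∀ (b : List String),
    b.Pairwise (· ≤ ·) → ys.Pairwise (· ≤ ·) → (∀ x ∈ b, ∀ y ∈ ys, x ≤ y) →
    ys.foldl pvBStep b = ys.foldl PySem.Set.add b := by
  induction ys with
  | nil => intro b _ _ _; rfl
  | cons y ys ih =>
    intro b hb hy hle
    simp only [List.foldl_cons]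
    have hstep := pvBStep_eq_add b y hb (fun x hx => hle x hx y (by simp))
    rw [hstep]
    have hys := (List.pairwise_cons.mp hy).2
    have hyle : ∀ z ∈ ys, y ≤ z := (List.pairwise_cons.mp hy).1
    have hb' : (PySem.Set.add b y).Pairwise (· ≤ ·) := by
      simp only [PySem.Set.add, PySem.Set.contains]
      split_ifs with h
      · exact hb
      · rw [List.pairwise_append]
        exact ⟨hb, by simp, fun x hx z hz => by simp at hz; rw [hz]; exact hle x hx y (by simp)⟩
    apply ih _ hb' hys
    intro x hx z hz
    have : x ∈ b ∨ x = y := by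
      simp only [PySem.Set.add, PySem.Set.contains] at hx
      split_ifs at hx with h
      · exact Or.inl hx
      · rcases List.mem_append.mp hx with h1 | h1
        · exact Or.inl h1
        · simp at h1; exact Or.inr h1
    rcases this with h1 | rfl
    · exact hle x h1 z (by simp [hz])
    · exact hyle z hz

lemma pvKeyValue (L : List (String × String)) (k : String) :
    PySem.List.sorted (PySem.Set.ofList (pvInstrs L k)) (fun x => x) false
      = (pvInstrs (PySem.List.sorted L (fun p => p.2) false) k).foldl pvBStep [] := by
  set ys := pvInstrs (PySem.List.sorted L (fun p => p.2) false) k with hys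
  have hyp : ys.Pairwise (· ≤ ·) := by
    have h1 := PySem.List.sorted_pairwise L (fun p : String × String => p.2)
    have h2 := h1.sublist (List.filter_sublist (l := PySem.List.sorted L (fun p : String × String => p.2) false) (p := fun p => p.1 == k))
    rw [hys]
    unfold pvInstrs
    exact List.pairwise_map.mpr h2
  have hperm : ys.Perm (pvInstrs L k) := by
    have h1 := PySem.List.sorted_perm L (fun p : String × String => p.2) false
    exact (h1.filter _).map _
  rw [pvBStep_sorted ys [] (by simp) hyp (by simp), ← PySem.Set.ofList_eq_foldl]
  have hofperm : (PySem.Set.ofList (pvInstrs L k)).Perm (PySem.Set.ofList ys) := by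
    rw [List.perm_ext_iff_of_nodup (PySem.Set.nodup_ofList _) (PySem.Set.nodup_ofList _)]
    intro a
    rw [PySem.Set.mem_ofList, PySem.Set.mem_ofList]
    exact hperm.symm.mem_iff
  rw [PySem.List.sorted_eq_sorted_of_perm _ _ _ (fun a b h => h) hofperm]
  apply PySem.List.sorted_eq_self_of_pairwise
  exact hyp.sublist (pvOfList_sublist ys)

set_option maxHeartbeats 1000000 in
lemma pvB_fold1_aux (instrument_key : String) (rows : List (List (String × String)))
    (acc : List (String × String)) (d : PySem.Dict String (List String)) :
    rows.foldl (fun (st : List (String × String) × PySem.Dict String (List String)) row =>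
      let emitter_id := normalize_emitter_id_py (pvRowEmitterRaw row)
      let instrument := pvRowInstrument row instrument_key
      if emitter_id ≠ "" ∧ instrument ≠ "" then
        (st.1 ++ [(emitter_id, instrument)], st.2.setdefault emitter_id [])
      else st)
      (acc, d)
    = (acc ++ rows.filterMap (pvPairOf instrument_key),
       (rows.filterMap (pvPairOf instrument_key)).foldl
         (fun d p => d.setdefault p.1 []) d) := by
  induction rows generalizing acc d with
  | nil => simp
  | cons r rows ih =>
    simp only [List.foldl_cons, List.filterMap_cons, pvPairOf]
    by_cases h : normalize_emitter_id_py (pvRowEmitterRaw r) = "" ∨ pvRowInstrument r instrument_key = ""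
    · rw [if_neg (by tauto : ¬(normalize_emitter_id_py (pvRowEmitterRaw r) ≠ "" ∧ pvRowInstrument r instrument_key ≠ ""))]
      rw [if_pos h, ih]
      simp [pvPairOf]
    · rw [if_pos (by tauto : normalize_emitter_id_py (pvRowEmitterRaw r) ≠ "" ∧ pvRowInstrument r instrument_key ≠ "")]
      rw [if_neg h, ih]
      simp [pvPairOf]


-- A's loop, rewritten over the valid pairs
lemma pvA_fold (rows : List (List (String × String))) (instrument_key : String) :
    rows.foldl (fun d row =>
      let emitter_id := normalize_emitter_id_py (pvRowEmitterRaw row)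
      let instrument := pvRowInstrument row instrument_key
      if emitter_id = "" ∨ instrument = "" then d
      else d.modify emitter_id PySem.Set.empty (fun s => PySem.Set.add s instrument))
      PySem.Dict.empty
    = (rows.filterMap (pvPairOf instrument_key)).foldl
        (fun d p => d.modify p.1 [] (fun s => PySem.Set.add s p.2)) PySem.Dict.empty := by
  rw [List.foldl_filterMap]
  apply PySem.List.foldl_congr_mem
  intro d row _
  simp only [pvPairOf]
  split_ifs with h <;> rfl

lemma pvB_fold1 (rows : List (List (String × String))) (instrument_key : String) :
    rows.foldl (fun (st : List (String × String) × PySem.Dict String (List String)) row =>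
      let emitter_id := normalize_emitter_id_py (pvRowEmitterRaw row)
      let instrument := pvRowInstrument row instrument_key
      if emitter_id ≠ "" ∧ instrument ≠ "" then
        (st.1 ++ [(emitter_id, instrument)], st.2.setdefault emitter_id [])
      else st)
      ([], PySem.Dict.empty)
    = (rows.filterMap (pvPairOf instrument_key),
       (rows.filterMap (pvPairOf instrument_key)).foldl
         (fun d p => d.setdefault p.1 []) PySem.Dict.empty) := by
  simpa using pvB_fold1_aux instrument_key rows [] PySem.Dict.empty

-- value of A's dict at any key
lemma pvA_getD (L : List (String × String)) (d : PySem.Dict String (PySem.Set String)) (k : String) :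
    (L.foldl (fun d p => d.modify p.1 [] (fun s => PySem.Set.add s p.2)) d).getD k []
      = PySem.Set.update (d.getD k []) (pvInstrs L k) := by
  induction L generalizing d with
  | nil => simp [pvInstrs, PySem.Set.update]
  | cons p L ih =>
    simp only [List.foldl_cons, ih]
    by_cases h : k = p.1
    · subst h
      simp [pvInstrs, PySem.Set.update]
    · simp [pvInstrs, PySem.Dict.getD_modify, Ne.symm h, h, PySem.Set.update]


-- the whole equivalence over the list of valid pairs
lemma pvMain (L : List (String × String)) :
    (L.foldl (fun d p => d.modify p.1 [] (fun s => PySem.Set.add s p.2)) PySem.Dict.empty).items.map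
        (fun p => (p.1, PySem.List.sorted p.2 (fun x => x) false))
      = ((PySem.List.sorted L (fun p => p.2) false).foldl
           (fun d p =>
             if d.getD p.1 [] = [] ∨ PySem.List.pyGet? (d.getD p.1 []) (-1) ≠ some p.2 then
               d.modify p.1 [] (fun b => b ++ [p.2])
             else d)
           (L.foldl (fun d p => d.setdefault p.1 []) PySem.Dict.empty)).items := by
  set L' := PySem.List.sorted L (fun p : String × String => p.2) false with hM
  set dS := L.foldl (fun d p => d.setdefault p.1 []) PySem.Dict.empty with hdS
  have hkS : dS.keys = PySem.Set.ofList (L.map (·.1)) := by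
    rw [hdS, pvB_keys]
    simp [PySem.Set.update, PySem.Set.ofList_eq_foldl]
  have hmemM : ∀ p ∈ L', p.1 ∈ dS.keys := by
    intro p hp
    rw [hkS, PySem.Set.mem_ofList]
    exact List.mem_map.mpr ⟨p, (PySem.List.sorted_perm L (fun p : String × String => p.2) false).mem_iff.mp hp, rfl⟩
  have hkB := pvB_keys2 L' dS hmemM
  have hndB : ((L'.foldl (fun d p =>
        if d.getD p.1 [] = [] ∨ PySem.List.pyGet? (d.getD p.1 []) (-1) ≠ some p.2 then
          d.modify p.1 [] (fun b => b ++ [p.2])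
        else d) dS)).keys.Nodup := by
    rw [hkB, hkS]; exact PySem.Set.nodup_ofList _
  have hndA := pvA_keys_nodup L
  rw [PySem.Dict.items_eq_map_keys _ hndA ([] : PySem.Set String),
      PySem.Dict.items_eq_map_keys _ hndB ([] : List String),
      List.map_map, pvA_keys L, hkB, hkS]
  apply List.map_congr_left
  intro k _
  simp only [Function.comp_apply]
  congr 1
  rw [pvA_getD, pvB_getD2, pvB_getD1 L PySem.Dict.empty (fun j => by simp) k,
      PySem.Dict.getD_empty]
  rw [show PySem.Set.update ([] : PySem.Set String) (pvInstrs L k) = PySem.Set.ofList (pvInstrs L k) from by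
        simp [PySem.Set.update, PySem.Set.ofList_eq_foldl]]
  exact pvKeyValue L k

-- ===== VERDICT (by name: the statement is the Claim_ definition above) =====
theorem collect_market_instruments_py_spec : Claim_equal_collect_market_instruments_py := by
  intro rows instrument_key _
  unfold Spec_collect_market_instruments_py
  simp only [collect_market_instruments_py, collect_market_instruments_py_alt]
  rw [pvA_fold, pvB_fold1]
  exact pvMain (rows.filterMap (pvPairOf instrument_key))
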